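-- pv_equiv track=rewrite | github.com/NVIDIA/nvbench | python/scripts/nvbench_plot_bwutil.py | strip_axis_filters_from_state_name
-- ===== SOURCE A (Python) =====
-- def strip_axis_filters_from_state_name(state_name, axis_filters):
--     if not axis_filters:
--         return state_name
--
--     tokens = state_name.split()
--     filter_prefixes = set(
--         "{}=".format(axis_filter["name"])
--         for axis_filter in axis_filters
--         if len(axis_filter["values"]) == 1
--     )
--     tokens = [
--         token
--         for token in tokens
--         if not any(token.startswith(prefix) for prefix in filter_prefixes)
--     ]
--     return " ".join(tokens)
-- ===== SOURCE B (Python) =====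
-- def _dropped(token, names):
--     prefix = ""
--     for ch in token:
--         if ch == "=" and prefix in names:
--             return True
--         prefix += ch
--     return False
--
--
-- def strip_axis_filters_from_state_name(state_name, axis_filters):
--     if not axis_filters:
--         return state_name
--     names = set()
--     for axis_filter in axis_filters:
--         if len(axis_filter["values"]) == 1:
--             names.add(axis_filter["name"])
--     kept = []
--     for token in state_name.split():
--         if not _dropped(token, names):
--             kept.append(token)
--     return " ".join(kept)
-- ===== Notes on version B (the rewrite author's own statement) =====
-- stated objective: alternative
-- what changed: A tests every token against a prebuilt set of 'name=' prefixes with startswith; B stores bare names, and for each token does one left-to-right character scan that grows the current prefix and hash-checks it in the name set whenever it reaches '=', appending survivors to an accumulator list.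
-- outside the precondition, e.g. on strip_axis_filters_from_state_name('a=1 b', [{'values': 'x'}]): A raises KeyError, B raises KeyError
import Mathlib
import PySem

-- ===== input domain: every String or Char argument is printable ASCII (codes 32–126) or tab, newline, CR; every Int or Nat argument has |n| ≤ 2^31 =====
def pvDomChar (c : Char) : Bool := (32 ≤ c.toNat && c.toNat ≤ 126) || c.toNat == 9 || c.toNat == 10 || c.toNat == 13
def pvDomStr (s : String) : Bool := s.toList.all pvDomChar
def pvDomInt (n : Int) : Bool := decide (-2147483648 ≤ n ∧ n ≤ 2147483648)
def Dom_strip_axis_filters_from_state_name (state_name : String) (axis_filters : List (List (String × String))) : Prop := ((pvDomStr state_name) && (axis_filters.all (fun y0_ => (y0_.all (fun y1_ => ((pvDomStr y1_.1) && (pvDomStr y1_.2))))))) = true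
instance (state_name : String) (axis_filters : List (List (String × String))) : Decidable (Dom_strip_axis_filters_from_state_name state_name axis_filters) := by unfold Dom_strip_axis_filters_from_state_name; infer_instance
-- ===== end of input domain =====

-- B replaces A's startswith scan over a set of 'name=' prefixes by one left-to-right scan per
-- token that grows the current prefix and hash-checks it at each '=' (objective: alternative).


-- ===== PORT A =====
-- "{}=".format(name): built via List Char so the kernel can reduce it (String.append is opaque)
def pvFmtEq (n : String) : String := String.ofList (n.toList ++ ['='])

def strip_axis_filters_from_state_name (state_name : String) (axis_filters : List (List (String × String))) : String :=
  if axis_filters = [] then state_name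
  else
    let tokens := PySem.Str.split₀ state_name
    let filter_prefixes : PySem.Set String := PySem.Set.ofList
      (axis_filters.filterMap (fun axis_filter =>
        if PySem.Str.len (((PySem.Dict.mk axis_filter).get? "values").getD "") = 1 then
          some (pvFmtEq (((PySem.Dict.mk axis_filter).get? "name").getD ""))
        else none))
    let tokens2 := tokens.filter (fun token =>
      ! (filter_prefixes.any (fun pre => PySem.Str.startswith token pre)))
    PySem.Str.join " " tokens2

-- ===== PORT B =====
-- _dropped: scan the token once, growing `prefix`; report True at an '=' whose prefix is a name
def pvDropped (cs : List Char) (pre : List Char) (names : PySem.Set String) : Bool :=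
  match cs with
  | [] => false
  | c :: rest =>
    if c == '=' && names.contains (String.ofList pre) then true
    else pvDropped rest (pre ++ [c]) names

def strip_axis_filters_from_state_name_alt (state_name : String) (axis_filters : List (List (String × String))) : String :=
  if axis_filters = [] then state_name
  else
    let names : PySem.Set String := axis_filters.foldl (fun acc axis_filter =>
      if PySem.Str.len (((PySem.Dict.mk axis_filter).get? "values").getD "") = 1 then
        acc.add (((PySem.Dict.mk axis_filter).get? "name").getD "")
      else acc) PySem.Set.empty
    let kept := (PySem.Str.split₀ state_name).foldl (fun acc token =>
      if ! pvDropped token.toList [] names then acc ++ [token] else acc) []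
    PySem.Str.join " " kept

-- ===== PRECONDITION & SPEC =====
-- Pre_ excludes exactly the inputs where Python A raises KeyError: a filter dict missing
-- "values", or a single-character-"values" filter dict missing "name".
def Pre_strip_axis_filters_from_state_name (state_name : String) (axis_filters : List (List (String × String))) : Prop :=
  ∀ f ∈ axis_filters,
    ((PySem.Dict.mk f).get? "values").isSome = true ∧
    (PySem.Str.len (((PySem.Dict.mk f).get? "values").getD "") = 1 →
      ((PySem.Dict.mk f).get? "name").isSome = true)
instance (state_name : String) (axis_filters : List (List (String × String))) : Decidable (Pre_strip_axis_filters_from_state_name state_name axis_filters) := by unfold Pre_strip_axis_filters_from_state_name; infer_instance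

def pvWitness_strip_axis_filters_from_state_name : String × (List (List (String × String))) :=
  ("a=1 bc=2 d", [[("name", "a"), ("values", "7")], [("name", "x"), ("values", "yz")]])

def Spec_strip_axis_filters_from_state_name (state_name : String) (axis_filters : List (List (String × String))) (out : String) : Prop := out = strip_axis_filters_from_state_name_alt state_name axis_filters
instance (state_name : String) (axis_filters : List (List (String × String))) (out : String) : Decidable (Spec_strip_axis_filters_from_state_name state_name axis_filters out) := by unfold Spec_strip_axis_filters_from_state_name; infer_instance

-- ===== CLAIM (what is proved, stated in full; the proofs are below) =====
def Claim_equal_strip_axis_filters_from_state_name : Prop := ∀ (state_name : String) (axis_filters : List (List (String × String))), Dom_strip_axis_filters_from_state_name state_name axis_filters → Pre_strip_axis_filters_from_state_name state_name axis_filters → Spec_strip_axis_filters_from_state_name state_name axis_filters (strip_axis_filters_from_state_name state_name axis_filters)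

-- ===== LEMMAS AND PROOFS =====

-- B's conditional add-fold builds exactly set(filterMap …) on top of its accumulator
lemma pv_fold_add_eq (L : List (List (String × String))) (acc : PySem.Set String) :
    L.foldl (fun acc axis_filter =>
      if PySem.Str.len (((PySem.Dict.mk axis_filter).get? "values").getD "") = 1 then
        acc.add (((PySem.Dict.mk axis_filter).get? "name").getD "")
      else acc) acc
    = PySem.Set.update acc (L.filterMap (fun axis_filter =>
        if PySem.Str.len (((PySem.Dict.mk axis_filter).get? "values").getD "") = 1 then
          some (((PySem.Dict.mk axis_filter).get? "name").getD "")
        else none)) := by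
  induction L generalizing acc with
  | nil => simp [PySem.Set.update]
  | cons f rest ih =>
    simp only [List.foldl_cons, List.filterMap_cons]
    by_cases h : PySem.Str.len (((PySem.Dict.mk f).get? "values").getD "") = 1
    · rw [if_pos h, if_pos h, ih]
      simp [PySem.Set.update]
    · rw [if_neg h, if_neg h, ih]

-- pvDropped characterised: some '=' in cs has its (pre ++ already-read) prefix in names
lemma pv_dropped_iff (cs pre : List Char) (names : PySem.Set String) :
    pvDropped cs pre names = true ↔
      ∃ k : Nat, cs[k]? = some '=' ∧
        names.contains (String.ofList (pre ++ cs.take k)) = true := by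
  induction cs generalizing pre with
  | nil => simp [pvDropped]
  | cons c rest ih =>
    rw [pvDropped]
    by_cases h : (c == '=' && names.contains (String.ofList pre)) = true
    · simp only [h, if_true, true_iff]
      simp only [Bool.and_eq_true, beq_iff_eq] at h
      exact ⟨0, by simp [h.1], by simpa using h.2⟩
    · rw [if_neg h, ih]
      constructor
      · rintro ⟨k, hget, hcont⟩
        exact ⟨k + 1, by simpa using hget, by simpa using hcont⟩
      · rintro ⟨k, hget, hcont⟩
        cases k with
        | zero =>
          exfalso
          apply h
          simp only [List.getElem?_cons_zero, Option.some.injEq] at hget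
          simp only [List.take_zero, List.append_nil] at hcont
          simp only [hget, beq_self_eq_true, Bool.true_and]
          exact hcont
        | succ k =>
          exact ⟨k, by simpa using hget, by simpa using hcont⟩

-- (n ++ ['=']) is a prefix of t iff t has n at the front and '=' right after it
lemma pv_prefix_eq_iff (n t : List Char) :
    (n ++ ['=']) <+: t ↔ (t.take n.length = n ∧ t[n.length]? = some '=') := by
  constructor
  · intro h
    have htake := List.prefix_iff_eq_take.mp h
    have hlen : (n ++ ['=']).length = n.length + 1 := by simp
    rw [hlen, List.take_add_one] at htake
    have hlen2 : n.length + 1 ≤ t.length := by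
      have := h.length_le; simpa using this
    have h1 : t.take n.length = n := by
      have : (t.take n.length).length = n.length := by simp; omega
      exact (List.append_inj htake.symm this).1
    have h2 : t[n.length]?.toList = ['='] := by
      have : (t.take n.length).length = n.length := by simp; omega
      exact (List.append_inj htake.symm this).2
    refine ⟨h1, ?_⟩
    cases hx : t[n.length]? with
    | none => simp [hx] at h2
    | some c => simp [hx] at h2; simp [h2]
  · rintro ⟨h1, h2⟩
    apply List.prefix_iff_eq_take.mpr
    have hlen : (n ++ ['=']).length = n.length + 1 := by simp
    rw [hlen, List.take_add_one, h1, h2]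
    simp

-- the heart: A's "some 'name=' prefix matches" = B's single scan with pvDropped
lemma pv_any_iff (t : String) (L : List String) :
    (PySem.Set.ofList (L.map pvFmtEq)).any (fun pre => PySem.Str.startswith t pre)
    = pvDropped t.toList [] (PySem.Set.ofList L) := by
  apply Bool.eq_iff_iff.mpr
  rw [pv_dropped_iff]
  simp only [List.any_eq_true, List.nil_append]
  constructor
  · rintro ⟨p, hp, hsw⟩
    have hp' : p ∈ L.map pvFmtEq := (PySem.Set.mem_ofList _ _).mp hp
    rcases List.mem_map.mp hp' with ⟨n, hn, rfl⟩
    rw [PySem.Str.startswith_eq] at hsw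
    have hpre : (n.toList ++ ['=']) <+: t.toList := by
      have : (pvFmtEq n).toList = n.toList ++ ['='] := by simp [pvFmtEq]
      rw [this] at hsw
      exact List.isPrefixOf_iff_prefix.mp hsw
    rcases (pv_prefix_eq_iff _ _).mp hpre with ⟨htk, hgt⟩
    refine ⟨n.toList.length, hgt, ?_⟩
    rw [htk, String.ofList_toList]
    simp only [PySem.Set.contains]
    exact List.elem_eq_true_of_mem ((PySem.Set.mem_ofList _ _).mpr hn)
  · rintro ⟨k, hget, hcont⟩
    set n := String.ofList (t.toList.take k) with hn
    have hmemL : n ∈ L := by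
      have : n ∈ PySem.Set.ofList L := by
        simpa [PySem.Set.contains, List.elem_iff] using hcont
      exact (PySem.Set.mem_ofList _ _).mp this
    have hklt : k < t.toList.length := (List.getElem?_eq_some_iff.mp hget).1
    have hslice : n.toList = t.toList.take k := by
      rw [hn, String.toList_ofList]
    have hlenn : n.toList.length = k := by
      rw [hslice, List.length_take]
      exact Nat.min_eq_left (Nat.le_of_lt hklt)
    refine ⟨pvFmtEq n, (PySem.Set.mem_ofList _ _).mpr (List.mem_map.mpr ⟨n, hmemL, rfl⟩), ?_⟩
    rw [PySem.Str.startswith_eq]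
    apply List.isPrefixOf_iff_prefix.mpr
    have : (pvFmtEq n).toList = n.toList ++ ['='] := by simp [pvFmtEq]
    rw [this]
    apply (pv_prefix_eq_iff _ _).mpr
    exact ⟨by rw [hlenn, ← hslice], by rw [hlenn]; exact hget⟩

-- ===== VERDICT (by name: the statement is the Claim_ definition above) =====
theorem strip_axis_filters_from_state_name_spec : Claim_equal_strip_axis_filters_from_state_name := by
  intro state_name axis_filters _hdom _hpre
  unfold Spec_strip_axis_filters_from_state_name
  unfold strip_axis_filters_from_state_name strip_axis_filters_from_state_name_alt
  by_cases hnil : axis_filters = []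
  · simp [hnil]
  · simp only [hnil, if_false]
    rw [pv_fold_add_eq]
    rw [show PySem.Set.update PySem.Set.empty
          (axis_filters.filterMap (fun axis_filter =>
            if PySem.Str.len (((PySem.Dict.mk axis_filter).get? "values").getD "") = 1 then
              some (((PySem.Dict.mk axis_filter).get? "name").getD "")
            else none))
        = PySem.Set.ofList (axis_filters.filterMap (fun axis_filter =>
            if PySem.Str.len (((PySem.Dict.mk axis_filter).get? "values").getD "") = 1 then
              some (((PySem.Dict.mk axis_filter).get? "name").getD "")
            else none)) from rfl]
    rw [PySem.List.foldl_append_ite_eq_filter]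
    congr 1
    apply List.filter_congr
    intro token _
    have hmap : axis_filters.filterMap (fun axis_filter =>
        if PySem.Str.len (((PySem.Dict.mk axis_filter).get? "values").getD "") = 1 then
          some (pvFmtEq (((PySem.Dict.mk axis_filter).get? "name").getD ""))
        else none)
      = (axis_filters.filterMap (fun axis_filter =>
          if PySem.Str.len (((PySem.Dict.mk axis_filter).get? "values").getD "") = 1 then
            some (((PySem.Dict.mk axis_filter).get? "name").getD "")
          else none)).map pvFmtEq := by
      rw [List.map_filterMap]
      apply List.filterMap_congr
      intro f _
      by_cases h : PySem.Str.len (((PySem.Dict.mk f).get? "values").getD "") = 1 <;> simp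
    rw [hmap]
    rw [pv_any_iff token _]
    simp
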